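-- pv_equiv track=rewrite | github.com/vanzan01/raindrop-io-mcp | src/raindrop/auth.py | validate_token_format
-- ===== SOURCE A (Python) =====
-- def validate_token_format(token: str) -> bool:
--     """Basic token format validation."""
--     if not isinstance(token, str):
--         return False
--
--     # Remove whitespace
--     token = token.strip()
--
--     # Basic checks
--     if len(token) < 10:  # Raindrop tokens are typically longer
--         return False
--
--     # Should contain only valid characters (alphanumeric and some special chars)
--     allowed_chars = set(
--         "abcdefghijklmnopqrstuvwxyzABCDEFGHIJKLMNOPQRSTUVWXYZ0123456789-_."
--     )
--     if not all(c in allowed_chars for c in token):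
--         return False
--
--     return True
-- ===== SOURCE B (Python) =====
-- import re
--
-- _TOKEN_RE = re.compile(r"[A-Za-z0-9\-_.]{10,}")
--
--
-- def validate_token_format(token: str) -> bool:
--     """Basic token format validation."""
--     if not isinstance(token, str):
--         return False
--     return bool(_TOKEN_RE.fullmatch(token.strip()))
-- ===== Notes on version B (the rewrite author's own statement) =====
-- stated objective: idiomatic
-- what changed: Replaces the explicit length check plus the all(c in allowed_chars) loop over a 65-character set with a single compiled-regex fullmatch (character class of letters, digits, hyphen, underscore, dot, repeated at least 10 times) on the stripped token, folding both constraints into one C-level pattern match.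
import Mathlib
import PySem

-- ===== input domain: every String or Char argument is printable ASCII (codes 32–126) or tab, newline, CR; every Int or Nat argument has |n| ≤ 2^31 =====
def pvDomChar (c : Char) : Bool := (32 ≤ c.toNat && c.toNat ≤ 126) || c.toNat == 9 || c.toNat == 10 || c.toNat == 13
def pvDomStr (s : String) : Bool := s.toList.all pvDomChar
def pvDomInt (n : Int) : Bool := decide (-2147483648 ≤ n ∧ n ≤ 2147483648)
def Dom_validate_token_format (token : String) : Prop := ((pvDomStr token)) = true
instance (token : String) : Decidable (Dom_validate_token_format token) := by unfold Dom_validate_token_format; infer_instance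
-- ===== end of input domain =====

-- B replaces the length check plus the membership loop over an explicit 65-char set with a
-- single regex-style fullmatch of [A-Za-z0-9\-_.]{10,} on the stripped token (idiomatic).

-- ===== PORT A =====
def validate_token_format (token : String) : Bool :=
  -- token = token.strip()
  let token := PySem.Str.strip token
  -- if len(token) < 10: return False
  if token.toList.length < 10 then false
  else
    -- allowed_chars = set("…")
    let allowed_chars : PySem.Set Char :=
      PySem.Set.ofList "abcdefghijklmnopqrstuvwxyzABCDEFGHIJKLMNOPQRSTUVWXYZ0123456789-_.".toList
    -- if not all(c in allowed_chars for c in token): return False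
    if !(token.toList.all (fun c => allowed_chars.contains c)) then false
    else true

-- ===== PORT B =====
-- the character class [A-Za-z0-9\-_.] of Source B's compiled pattern
def pvTokenClass (c : Char) : Bool :=
  ('A' ≤ c && c ≤ 'Z') || ('a' ≤ c && c ≤ 'z') || ('0' ≤ c && c ≤ '9') ||
  c == '-' || c == '_' || c == '.'

-- bool(_TOKEN_RE.fullmatch(token.strip())): the whole stripped token matches the class, {10,} times
def validate_token_format_alt (token : String) : Bool :=
  let t := (PySem.Str.strip token).toList
  decide (10 ≤ t.length) && t.all pvTokenClass

-- ===== PRECONDITION & SPEC =====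
def Spec_validate_token_format (token : String) (out : Bool) : Prop := out = validate_token_format_alt token
instance (token : String) (out : Bool) : Decidable (Spec_validate_token_format token out) := by unfold Spec_validate_token_format; infer_instance

-- ===== CLAIM (what is proved, stated in full; the proofs are below) =====
def Claim_equal_validate_token_format : Prop := ∀ (token : String), Dom_validate_token_format token → Spec_validate_token_format token (validate_token_format token)

-- ===== LEMMAS AND PROOFS =====

set_option maxRecDepth 8192 in
theorem pv_contains_eq_class_lt (n : Nat) (h : n < 127) :
    PySem.Set.contains
      (PySem.Set.ofList "abcdefghijklmnopqrstuvwxyzABCDEFGHIJKLMNOPQRSTUVWXYZ0123456789-_.".toList)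
      (Char.ofNat n) = pvTokenClass (Char.ofNat n) := by
  revert h
  revert n
  decide

theorem pv_contains_eq_class (c : Char) (h : pvDomChar c = true) :
    PySem.Set.contains
      (PySem.Set.ofList "abcdefghijklmnopqrstuvwxyzABCDEFGHIJKLMNOPQRSTUVWXYZ0123456789-_.".toList)
      c = pvTokenClass c := by
  have hlt : c.toNat < 127 := by
    simp [pvDomChar] at h
    omega
  have := pv_contains_eq_class_lt c.toNat hlt
  rwa [Char.ofNat_toNat] at this

theorem pv_all_congr_mem {l : List Char} {p q : Char → Bool}
    (h : ∀ c ∈ l, p c = q c) : l.all p = l.all q := by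
  induction l with
  | nil => rfl
  | cons x xs ih =>
    simp only [List.all_cons, h x List.mem_cons_self,
      ih (fun c hc => h c (List.mem_cons_of_mem _ hc))]

theorem pv_mem_strip {c : Char} {cs : List Char} (h : c ∈ PySem.Chars.strip cs) : c ∈ cs := by
  unfold PySem.Chars.strip PySem.Chars.rstrip PySem.Chars.lstrip at h
  have h1 := (List.dropWhile_sublist _).mem (List.mem_reverse.mp h)
  exact (List.dropWhile_sublist _).mem (List.mem_reverse.mp h1)

-- ===== VERDICT (by name: the statement is the Claim_ definition above) =====
theorem validate_token_format_spec : Claim_equal_validate_token_format := by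
  intro token hdom
  unfold Spec_validate_token_format validate_token_format validate_token_format_alt
  simp only []
  have hall :
      (PySem.Str.strip token).toList.all
        (fun c => PySem.Set.contains
          (PySem.Set.ofList "abcdefghijklmnopqrstuvwxyzABCDEFGHIJKLMNOPQRSTUVWXYZ0123456789-_.".toList) c)
      = (PySem.Str.strip token).toList.all pvTokenClass := by
    apply pv_all_congr_mem
    intro c hc
    apply pv_contains_eq_class
    have hmem : c ∈ token.toList := by
      rw [PySem.Str.toList_strip] at hc
      exact pv_mem_strip hc
    have := hdom
    unfold Dom_validate_token_format pvDomStr at this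
    exact List.all_eq_true.mp this c hmem
  rw [hall]
  generalize (PySem.Str.strip token).toList = l
  split_ifs with h1 h2
  · rw [decide_eq_false (by omega : ¬ (10 ≤ l.length))]
    simp
  · have h2' : l.all pvTokenClass = false := by
      cases hv : l.all pvTokenClass <;> simp [hv] at h2 ⊢
    rw [h2']
    simp
  · have h2' : l.all pvTokenClass = true := by
      cases hv : l.all pvTokenClass <;> simp [hv] at h2 ⊢
    rw [decide_eq_true (by omega : 10 ≤ l.length), h2']
    rfl
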